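-- pv_equiv track=rewrite | github.com/mh07607/urdu_grammar_correction | hindi_gec/wikiedits/scripts/filter_punct.py | pairwise_sent
-- ===== SOURCE A (Python) =====
-- def pairwise_sent(file):
--     prev = None
--     for line in file:
--         line = line.strip()
--         if not line or line.isspace():
--             continue
--         if prev is None:
--             prev = line
--         else:
--             yield prev, line
--             prev = None
-- ===== SOURCE B (Python) =====
-- def pairwise_sent(file):
--     xs = [s for s in map(str.strip, file) if s and not s.isspace()]
--     return zip(xs[::2], xs[1::2])
-- ===== Notes on version B (the rewrite author's own statement) =====
-- stated objective: alternative
-- what changed: Replaces A's one-pass prev/None toggle state machine with staged passes: materialize the list of cleaned lines once, then form the pairs by parity slicing (xs[::2] zipped with xs[1::2]) instead of tracking a pending element.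
import Mathlib
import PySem

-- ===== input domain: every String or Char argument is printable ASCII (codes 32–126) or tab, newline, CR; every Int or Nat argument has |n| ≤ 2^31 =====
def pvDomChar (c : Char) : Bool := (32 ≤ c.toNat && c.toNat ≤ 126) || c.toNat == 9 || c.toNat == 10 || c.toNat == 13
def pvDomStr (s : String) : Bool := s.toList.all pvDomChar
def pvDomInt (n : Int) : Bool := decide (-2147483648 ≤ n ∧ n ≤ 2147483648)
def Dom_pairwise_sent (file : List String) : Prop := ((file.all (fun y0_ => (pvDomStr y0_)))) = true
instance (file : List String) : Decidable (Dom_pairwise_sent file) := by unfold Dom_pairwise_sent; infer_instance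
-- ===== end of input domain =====

-- B replaces A's one-pass prev/None toggle state machine by staged passes (materialize the
-- cleaned lines, then zip the even-index slice with the odd-index slice); same cost.

-- ===== PORT A =====
-- A's loop: `prev` holds the pending first line of a pair (None ↔ none).
def pairwise_sentLoop (prev : Option String) : List String → List (String × String)
  | [] => []
  | l :: rest =>
    let line := PySem.Str.strip l
    if line = "" ∨ PySem.Str.strIsspace line then
      pairwise_sentLoop prev rest
    else
      match prev with
      | none => pairwise_sentLoop (some line) rest
      | some p => (p, line) :: pairwise_sentLoop none rest

def pairwise_sent (file : List String) : List (String × String) :=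
  pairwise_sentLoop none file

-- ===== PORT B =====
-- Source B: xs = [s for s in map(str.strip, file) if s and not s.isspace()]; zip(xs[::2], xs[1::2])
-- (slice? never returns none here since the step 2 ≠ 0, so getD [] substitutes nothing)
def pairwise_sent_alt (file : List String) : List (String × String) :=
  let xs := (file.map PySem.Str.strip).filter (fun s => !(s = "" || PySem.Str.strIsspace s))
  List.zip ((PySem.List.slice? xs none none 2).getD []) ((PySem.List.slice? xs (some 1) none 2).getD [])

-- ===== PRECONDITION & SPEC =====
def Spec_pairwise_sent (file : List String) (out : List (String × String)) : Prop := out = pairwise_sent_alt file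
instance (file : List String) (out : List (String × String)) : Decidable (Spec_pairwise_sent file out) := by unfold Spec_pairwise_sent; infer_instance

-- ===== CLAIM (what is proved, stated in full; the proofs are below) =====
def Claim_equal_pairwise_sent : Prop := ∀ (file : List String), Dom_pairwise_sent file → Spec_pairwise_sent file (pairwise_sent file)

-- ===== LEMMAS AND PROOFS =====

-- proof-side helpers: the even- and odd-index sublists, and non-overlapping consecutive pairs
def pvEvens {α : Type} : List α → List α
  | [] => []
  | [a] => [a]
  | a :: _ :: r => a :: pvEvens r

def pvOdds {α : Type} : List α → List α
  | [] => []
  | [_] => []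
  | _ :: b :: r => b :: pvOdds r

def pvPairUp {α : Type} : List α → List (α × α)
  | a :: b :: rest => (a, b) :: pvPairUp rest
  | _ => []

theorem pvZip_evens_odds {α : Type} (xs : List α) :
    List.zip (pvEvens xs) (pvOdds xs) = pvPairUp xs := by
  induction xs using pvPairUp.induct with
  | case1 a b rest ih => simpa [pvEvens, pvOdds, pvPairUp, List.zip] using ih
  | case2 xs h =>
    match xs, h with
    | [], _ => rfl
    | [a], _ => rfl
    | a :: b :: r, h => exact (h a b r rfl).elim
theorem pvFilterMap_evens {α : Type} (xs : List α) :
    List.filterMap (fun k => xs[2 * k]?) (List.range ((xs.length + 1) / 2)) = pvEvens xs := by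
  induction xs using pvPairUp.induct with
  | case1 a b rest ih =>
    have hlen : ((a :: b :: rest).length + 1) / 2 = (rest.length + 1) / 2 + 1 := by
      simp [List.length_cons]; omega
    rw [hlen, List.range_succ_eq_map, List.filterMap_cons, List.filterMap_map]
    have hfun : ((fun k => (a :: b :: rest)[2 * k]?) ∘ Nat.succ) = (fun k : ℕ => rest[2 * k]?) := by
      funext k
      have h2 : 2 * Nat.succ k = 2 * k + 1 + 1 := by omega
      simp only [Function.comp_apply, h2, List.getElem?_cons_succ]
    rw [hfun, ih]
    rfl
  | case2 xs h =>
    match xs, h with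
    | [], _ => simp [pvEvens]
    | [a], _ => simp [pvEvens, List.range_succ]
    | a :: b :: r, h => exact (h a b r rfl).elim
theorem pvFilterMap_odds {α : Type} (xs : List α) :
    List.filterMap (fun k => xs[2 * k + 1]?) (List.range (xs.length / 2)) = pvOdds xs := by
  induction xs using pvPairUp.induct with
  | case1 a b rest ih =>
    have hlen : (a :: b :: rest).length / 2 = rest.length / 2 + 1 := by
      simp [List.length_cons]; omega
    rw [hlen, List.range_succ_eq_map, List.filterMap_cons, List.filterMap_map]
    have hfun : ((fun k => (a :: b :: rest)[2 * k + 1]?) ∘ Nat.succ) = (fun k : ℕ => rest[2 * k + 1]?) := by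
      funext k
      have h2 : 2 * Nat.succ k = 2 * k + 1 + 1 := by omega
      simp only [Function.comp_apply, List.getElem?_cons_succ, h2]
    rw [hfun, ih]
    rfl
  | case2 xs h =>
    match xs, h with
    | [], _ => simp [pvOdds]
    | [a], _ => simp [pvOdds]
    | a :: b :: r, h => exact (h a b r rfl).elim
theorem pvSlice_evens {α : Type} (xs : List α) :
    PySem.List.slice? xs none none 2 = some (pvEvens xs) := by
  simp only [PySem.List.slice?, PySem.List.sliceIndices]
  norm_num
  have hc : (if 0 < xs.length then (((xs.length : Int) + 2 - 1) / 2).toNat else 0)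
      = (xs.length + 1) / 2 := by
    split <;> omega
  rw [hc]
  simp only [show ∀ k : ℕ, ((2 : Int) * (k : Int)).toNat = 2 * k from fun k => by omega]
  exact pvFilterMap_evens xs

theorem pvSlice_odds {α : Type} (xs : List α) :
    PySem.List.slice? xs (some 1) none 2 = some (pvOdds xs) := by
  simp only [PySem.List.slice?, PySem.List.sliceIndices]
  norm_num
  have hs : min (1 : Int) (xs.length : Int) = if xs.length = 0 then 0 else 1 := by
    split <;> omega
  rw [hs]
  by_cases h0 : xs.length = 0
  · match xs, List.length_eq_zero_iff.mp h0 with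
    | [], _ => simp [pvOdds]
  · simp only [if_neg h0]
    have hc : (if 1 < xs.length then (((xs.length : Int) - 1 + 2 - 1) / 2).toNat else 0)
        = xs.length / 2 := by
      split <;> omega
    rw [hc]
    simp only [show ∀ k : ℕ, ((1 : Int) + 2 * (k : Int)).toNat = 2 * k + 1 from fun k => by omega]
    exact pvFilterMap_odds xs

-- A's toggle loop computes the consecutive pairs of the cleaned lines
theorem pairwise_sentLoop_eq (ls : List String) : ∀ (prev : Option String),
    pairwise_sentLoop prev ls =
      pvPairUp ((prev.toList) ++ ((ls.map PySem.Str.strip).filter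
        (fun s => !(s = "" || PySem.Str.strIsspace s)))) := by
  induction ls with
  | nil => intro prev; cases prev <;> simp [pairwise_sentLoop, pvPairUp]
  | cons l rest ih =>
    intro prev
    simp only [pairwise_sentLoop, List.map_cons, List.filter_cons]
    by_cases h : PySem.Str.strip l = "" ∨ PySem.Str.strIsspace (PySem.Str.strip l)
    · have hb : (!(decide (PySem.Str.strip l = "") || PySem.Str.strIsspace (PySem.Str.strip l))) = false := by
        rcases h with he | hs
        · rw [he]; decide
        · rw [hs]; simp
      simp only [if_pos h, hb, Bool.false_eq_true, if_false]
      exact ih prev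
    · push Not at h
      have hb : (!(decide (PySem.Str.strip l = "") || PySem.Str.strIsspace (PySem.Str.strip l))) = true := by
        rw [Bool.not_eq_true', Bool.or_eq_false_iff]
        exact ⟨decide_eq_false h.1, (Bool.not_eq_true _).mp h.2⟩
      have h' : ¬ (PySem.Str.strip l = "" ∨ PySem.Str.strIsspace (PySem.Str.strip l) = true) := by
        rintro (he | hs); exacts [h.1 he, h.2 hs]
      simp only [if_neg h', hb, if_true]
      cases prev with
      | none => exact ih (some (PySem.Str.strip l))
      | some p => rw [ih none]; rfl

-- ===== VERDICT (by name: the statement is the Claim_ definition above) =====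
theorem pairwise_sent_spec : Claim_equal_pairwise_sent := by
  intro file _
  unfold Spec_pairwise_sent pairwise_sent pairwise_sent_alt
  simp only [pvSlice_evens, pvSlice_odds, Option.getD_some]
  rw [pvZip_evens_odds]
  simpa using pairwise_sentLoop_eq file none
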